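-- pv_equiv track=rewrite | github.com/Mwie1024/Extra-CoT | src/extracot/data/compressor/dataset_preparation/camel/camel_chunk_cot_and_answer/math_tokenizer_no_space.py | in_any_span
-- ===== SOURCE A (Python) =====
-- from typing import List, Tuple, Optional
--
-- def in_any_span(x: int, spans: List[Tuple[int,int]]) -> bool:
--     lo, hi = 0, len(spans)
--     while lo < hi:
--         mid = (lo+hi)//2
--         a,b = spans[mid]
--         if a <= x < b: return True
--         if x < a: hi = mid
--         else: lo = mid + 1
--     return False
-- ===== SOURCE B (Python) =====
-- def in_any_span(x, spans):
--     if not spans: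
--         return False
--     mid = len(spans) // 2
--     a, b = spans[mid]
--     if a <= x < b:
--         return True
--     if x < a:
--         return in_any_span(x, spans[:mid])
--     return in_any_span(x, spans[mid + 1:])
-- ===== Notes on version B (the rewrite author's own statement) =====
-- stated objective: alternative
-- what changed: Replaces the iterative lo/hi-index binary-search loop with a recursive function on sublists: it picks the middle of the current list and recurses on the left or right half obtained by slicing, with no index bookkeeping.
import Mathlib
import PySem

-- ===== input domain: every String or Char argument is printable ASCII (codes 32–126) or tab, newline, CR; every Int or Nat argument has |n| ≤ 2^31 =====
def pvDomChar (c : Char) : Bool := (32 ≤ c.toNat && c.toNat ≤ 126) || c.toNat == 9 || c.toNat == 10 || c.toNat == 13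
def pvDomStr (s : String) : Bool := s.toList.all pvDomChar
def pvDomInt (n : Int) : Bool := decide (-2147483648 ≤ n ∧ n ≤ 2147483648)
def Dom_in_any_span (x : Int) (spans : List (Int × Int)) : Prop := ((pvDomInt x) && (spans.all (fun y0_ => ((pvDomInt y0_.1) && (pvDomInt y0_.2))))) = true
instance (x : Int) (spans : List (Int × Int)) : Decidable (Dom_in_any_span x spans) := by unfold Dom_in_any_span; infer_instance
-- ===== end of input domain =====

-- B replaces A's iterative lo/hi-index binary search by recursion on sublists (same comparisons, alternative decomposition).

-- ===== PORT A =====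
-- A's while loop, state (lo, hi); spans[mid] is always in range when entered from in_any_span
-- (0 ≤ lo < hi ≤ len), so the none (IndexError) branch is unreachable there
def inAnySpanLoop (x : Int) (spans : List (Int × Int)) (lo hi : Int) : Bool :=
  if _h : lo < hi then
    let mid := PySem.Int.floordiv (lo + hi) 2
    match PySem.List.pyGet? spans mid with
    | none => false
    | some (a, b) =>
      if a ≤ x ∧ x < b then true
      else if x < a then inAnySpanLoop x spans lo mid
      else inAnySpanLoop x spans (mid + 1) hi
  else false
termination_by (hi - lo).toNat
decreasing_by
  all_goals simp only [PySem.Int.floordiv_eq_ediv_of_pos (by norm_num : (0:Int) < 2)] at *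
  all_goals omega

def in_any_span (x : Int) (spans : List (Int × Int)) : Bool :=
  inAnySpanLoop x spans 0 (spans.length : Int)

-- ===== PORT B =====
def in_any_span_alt (x : Int) (spans : List (Int × Int)) : Bool :=
  if h : spans.length = 0 then false                              -- if not spans: return False
  else
    let mid := spans.length / 2
    let p := spans[mid]'(Nat.div_lt_self (Nat.pos_of_ne_zero h) (by omega))
    if p.1 ≤ x ∧ x < p.2 then true
    else if x < p.1 then in_any_span_alt x (spans.take mid)       -- spans[:mid]
    else in_any_span_alt x (spans.drop (mid + 1))                 -- spans[mid+1:]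
termination_by spans.length
decreasing_by
  all_goals simp
  all_goals omega

-- ===== PRECONDITION & SPEC =====
def Spec_in_any_span (x : Int) (spans : List (Int × Int)) (out : Bool) : Prop := out = in_any_span_alt x spans
instance (x : Int) (spans : List (Int × Int)) (out : Bool) : Decidable (Spec_in_any_span x spans out) := by unfold Spec_in_any_span; infer_instance

-- ===== CLAIM (what is proved, stated in full; the proofs are below) =====
def Claim_equal_in_any_span : Prop := ∀ (x : Int) (spans : List (Int × Int)), Dom_in_any_span x spans → Spec_in_any_span x spans (in_any_span x spans)

-- ===== LEMMAS AND PROOFS =====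

-- loop invariant: A's loop on (lo, hi) computes B's recursion on the sublist spans[lo:hi]
lemma loop_eq_rec (x : Int) (spans : List (Int × Int)) :
    ∀ (n lo hi : Nat), hi - lo = n → lo ≤ hi → hi ≤ spans.length →
      inAnySpanLoop x spans (lo : Int) (hi : Int)
        = in_any_span_alt x ((spans.drop lo).take (hi - lo)) := by
  intro n
  induction n using Nat.strong_induction_on with
  | _ n ih =>
    intro lo hi hn hlh hhl
    by_cases hc : lo < hi
    · have hm2 : (lo+hi)/2 < hi := by omega
      have hmlo : lo ≤ (lo+hi)/2 := by omega
      set m := (lo+hi)/2 with hmdef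
      have hmlen : m < spans.length := by omega
      have hlen : ((spans.drop lo).take (hi - lo)).length = hi - lo := by
        simp; omega
      rw [inAnySpanLoop, dif_pos (by exact_mod_cast hc)]
      have hcast : PySem.Int.floordiv ((lo:Int) + (hi:Int)) 2 = (m : Int) := by
        rw [PySem.Int.floordiv_eq_ediv_of_pos (by norm_num)]
        omega
      simp only [hcast, PySem.List.pyGet?_natCast]
      rw [List.getElem?_eq_getElem hmlen]
      rw [in_any_span_alt]
      rw [dif_neg (by rw [hlen]; omega)]
      simp only [hlen, List.getElem_take, List.getElem_drop, List.get_eq_getElem]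
      have him : lo + (hi - lo) / 2 = m := by omega
      simp only [him]
      by_cases h1 : spans[m].1 ≤ x ∧ x < spans[m].2
      · simp [h1]
      · by_cases h2 : x < spans[m].1
        · simp only [if_neg h1, if_pos h2]
          rw [List.take_take]
          have e1 : min ((hi - lo) / 2) (hi - lo) = m - lo := by omega
          rw [e1, ih (m - lo) (by omega) lo m rfl hmlo (by omega)]
        · simp only [if_neg h1, if_neg h2]
          rw [List.drop_take, List.drop_drop]
          have e2 : (hi - lo) - ((hi - lo) / 2 + 1) = hi - (m + 1) := by omega
          have e3 : lo + ((hi - lo) / 2 + 1) = m + 1 := by omega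
          rw [e2, e3]
          have hrec := ih (hi - (m + 1)) (by omega) (m + 1) hi rfl (by omega) hhl
          push_cast at hrec
          rw [hrec]
    · have h0 : hi - lo = 0 := by omega
      rw [inAnySpanLoop, dif_neg (by exact_mod_cast hc), h0]
      simp [in_any_span_alt]

-- ===== VERDICT (by name: the statement is the Claim_ definition above) =====
theorem in_any_span_spec : Claim_equal_in_any_span := by
  intro x spans _
  unfold Spec_in_any_span in_any_span
  have h := loop_eq_rec x spans (spans.length) 0 spans.length rfl (by omega) le_rfl
  simpa using h
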